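-- pv_equiv track=rewrite | github.com/LucassTeixeiraN/AEDD | M3L/8.py | find_in_matrix
-- ===== SOURCE A (Python) =====
-- def binary_search(array, target):
--     """Realiza uma busca binária e retorna uma lista com os índices onde o elemento foi encontrado."""
--     left, right = 0, len(array) - 1
--     positions = []
--
--
--     while left <= right:
--         mid = (left + right) // 2
--         if array[mid] == target:
--
--             positions.append(mid)
--
--             i = mid - 1
--             while i >= 0 and array[i] == target:
--                 positions.append(i)
--                 i -= 1
--
--             i = mid + 1
--             while i < len(array) and array[i] == target:
--                 positions.append(i)
--                 i += 1
--             break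
--         elif array[mid] < target:
--             left = mid + 1
--         else:
--             right = mid - 1
--
--     return sorted(positions)
--
-- def find_in_matrix(matrix, target):
--
--     flat_matrix = []
--     index_map = {}
--
--     for i in range(len(matrix)):
--         for j in range(len(matrix[i])):
--             index = i * len(matrix[0]) + j
--             flat_matrix.append(matrix[i][j])
--             index_map[index] = (i, j)
--
--     sorted_flat_matrix = sorted(flat_matrix)
--
--     positions_in_flat = binary_search(sorted_flat_matrix, target)
--
--     # Converte os índices da lista achatada para posições na matriz original
--     matrix_positions = [index_map[pos] for pos in positions_in_flat]
--
--     return matrix_positions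
-- ===== SOURCE B (Python) =====
-- def find_in_matrix(matrix, target):
--     less = 0
--     equal = 0
--     for row in matrix:
--         for x in row:
--             if x < target:
--                 less += 1
--             elif x == target:
--                 equal += 1
--     if equal == 0:
--         return []
--     cols = len(matrix[0])
--     return [(k // cols, k % cols) for k in range(less, less + equal)]
-- ===== Notes on version B (the rewrite author's own statement) =====
-- stated objective: faster
-- what changed: Instead of flattening, sorting and binary-searching with neighbour expansion, B makes one counting pass (elements < target and == target) and emits the index range [less, less+equal) mapped through k -> (k//cols, k%cols), which is exactly what A's index_map lookup computes on rectangular matrices.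
-- outside the precondition, e.g. on find_in_matrix([[1], [2, 3]], 3): A returns [(1, 1)], B returns [(2, 0)]; on find_in_matrix([[1, 2], [3], [4]], 4): A raises KeyError, B returns [(1, 1)]
import Mathlib
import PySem

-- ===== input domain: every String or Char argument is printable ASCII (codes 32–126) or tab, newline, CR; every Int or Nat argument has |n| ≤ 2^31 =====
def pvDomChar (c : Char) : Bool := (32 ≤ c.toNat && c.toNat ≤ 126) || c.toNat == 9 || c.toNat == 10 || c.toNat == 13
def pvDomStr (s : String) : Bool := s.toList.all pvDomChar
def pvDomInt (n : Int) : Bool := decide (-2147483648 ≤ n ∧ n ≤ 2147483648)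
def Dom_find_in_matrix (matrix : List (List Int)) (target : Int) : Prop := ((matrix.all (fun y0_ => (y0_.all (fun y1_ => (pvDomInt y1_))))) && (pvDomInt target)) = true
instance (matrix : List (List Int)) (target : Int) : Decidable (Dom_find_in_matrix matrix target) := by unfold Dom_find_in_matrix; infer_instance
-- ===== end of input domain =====

-- B replaces A's flatten + sort + binary-search-with-expansion by one counting pass and a
-- closed-form index range; proved equal to A on rectangular matrices (and ragged ones where
-- the target is absent), which Pre_ states.

-- ===== PORT A =====

-- 'while i >= 0 and array[i] == target: positions.append(i); i -= 1'
-- (index always in range when read: the 0 ≤ i guard is checked first, so pyGet?.getD 0 is exact)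
def bsDown (array : List Int) (target : Int) (i : Int) : List Int :=
  if h : 0 ≤ i ∧ (PySem.List.pyGet? array i).getD 0 = target then
    i :: bsDown array target (i - 1)
  else []
termination_by (i + 1).toNat
decreasing_by omega

-- 'while i < len(array) and array[i] == target: positions.append(i); i += 1'
def bsUp (array : List Int) (target : Int) (i : Int) : List Int :=
  if h : i < (array.length : Int) ∧ (PySem.List.pyGet? array i).getD 0 = target then
    i :: bsUp array target (i + 1)
  else []
termination_by ((array.length : Int) - i).toNat
decreasing_by omega

-- the 'while left <= right' loop of binary_search; positions in Python append order
def bsLoop (array : List Int) (target : Int) (left right : Int) : List Int :=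
  if hlr : left ≤ right then
    let mid := PySem.Int.floordiv (left + right) 2
    let v := (PySem.List.pyGet? array mid).getD 0
    if v = target then
      mid :: (bsDown array target (mid - 1) ++ bsUp array target (mid + 1))
    else if v < target then
      bsLoop array target (mid + 1) right
    else
      bsLoop array target left (mid - 1)
  else []
termination_by (right - left + 1).toNat
decreasing_by
  · have := PySem.Int.floordiv_two_mid_bounds (lo := left) (hi := right) hlr
    omega
  · have := PySem.Int.floordiv_two_mid_bounds (lo := left) (hi := right) hlr
    omega

def binary_search (array : List Int) (target : Int) : List Int :=
  PySem.List.sorted (bsLoop array target 0 ((array.length : Int) - 1)) (fun x => x) false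

def find_in_matrix (matrix : List (List Int)) (target : Int) : List (Int × Int) :=
  let st : List Int × PySem.Dict Int (Int × Int) :=
    (PySem.List.pyRange 0 (matrix.length : Int) 1).foldl
      (fun st i =>
        (PySem.List.pyRange 0 ((PySem.List.pyGetD matrix i []).length : Int) 1).foldl
          (fun st j =>
            (st.1 ++ [PySem.List.pyGetD (PySem.List.pyGetD matrix i []) j 0],
             st.2.insert (i * ((PySem.List.pyGetD matrix 0 []).length : Int) + j) (i, j)))
          st)
      ([], PySem.Dict.empty)
  let sorted_flat := PySem.List.sorted st.1 (fun x => x) false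
  let positions := binary_search sorted_flat target
  -- 'index_map[pos]': under Pre_ the key is always present, so get?.getD is exact
  positions.map (fun p => (st.2.get? p).getD (0, 0))

-- ===== PORT B =====
def find_in_matrix_alt (matrix : List (List Int)) (target : Int) : List (Int × Int) :=
  let cnt : Int × Int :=
    matrix.foldl
      (fun p row =>
        row.foldl
          (fun p x =>
            if x < target then (p.1 + 1, p.2)
            else if x = target then (p.1, p.2 + 1)
            else p)
          p)
      (0, 0)
  if cnt.2 = 0 then []
  else
    let cols : Int := ((PySem.List.pyGetD matrix 0 []).length : Int)
    (PySem.List.pyRange cnt.1 (cnt.1 + cnt.2) 1).map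
      (fun k => (PySem.Int.floordiv k cols, PySem.Int.mod k cols))

-- ===== PRECONDITION & SPEC =====
-- Pre_ excludes ragged matrices that contain the target: there A's index_map (keyed by
-- i*len(matrix[0])+j) collides or skips flat indices, so A raises KeyError or returns
-- accidental positions.
def Pre_find_in_matrix (matrix : List (List Int)) (target : Int) : Prop :=
  (∀ row ∈ matrix, row.length = (matrix.headD []).length) ∨ (∀ row ∈ matrix, target ∉ row)
instance (matrix : List (List Int)) (target : Int) : Decidable (Pre_find_in_matrix matrix target) := by
  unfold Pre_find_in_matrix; infer_instance

def pvWitness_find_in_matrix : List (List Int) × Int := ([[1, 2], [3, 4]], 3)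

def Spec_find_in_matrix (matrix : List (List Int)) (target : Int) (out : List (Int × Int)) : Prop := out = find_in_matrix_alt matrix target
instance (matrix : List (List Int)) (target : Int) (out : List (Int × Int)) : Decidable (Spec_find_in_matrix matrix target out) := by unfold Spec_find_in_matrix; infer_instance

-- ===== CLAIM (what is proved, stated in full; the proofs are below) =====
def Claim_equal_find_in_matrix : Prop := ∀ (matrix : List (List Int)) (target : Int), Dom_find_in_matrix matrix target → Pre_find_in_matrix matrix target → Spec_find_in_matrix matrix target (find_in_matrix matrix target)

-- ===== LEMMAS AND PROOFS =====

theorem pv_cnt_le (l : List Int) (t : Int) :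
    l.countP (fun x => decide (x < t)) + l.count t ≤ l.length := by
  induction l with
  | nil => simp
  | cons a l ih =>
    simp only [List.countP_cons, List.count_cons, List.length_cons]
    by_cases h1 : a < t <;> by_cases h2 : a = t <;> simp [h1, h2] <;> omega
theorem pv_char (l : List Int) (t : Int) (hs : l.Pairwise (· ≤ ·)) :
    ∀ (k : Nat) (hk : k < l.length),
      (l[k] < t ↔ k < l.countP (fun x => decide (x < t))) ∧
      (l[k] = t ↔ (l.countP (fun x => decide (x < t)) ≤ k ∧
                   k < l.countP (fun x => decide (x < t)) + l.count t)) := by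
  induction l with
  | nil => intro k hk; simp at hk
  | cons a l ih =>
    rw [List.pairwise_cons] at hs
    obtain ⟨ha, hl⟩ := hs
    intro k hk
    have hcl0 : ¬ a < t → l.countP (fun x => decide (x < t)) = 0 := by
      intro h; rw [List.countP_eq_zero]
      intro x hx; have := ha x hx; simp; omega
    have hce0 : t < a → l.count t = 0 := by
      intro h; rw [List.count_eq_zero]
      intro hmem; have := ha t hmem; omega
    have e1 : (a :: l).countP (fun x => decide (x < t))
        = l.countP (fun x => decide (x < t)) + (if a < t then 1 else 0) := by
      by_cases h : a < t <;> simp [h]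
    have e2 : (a :: l).count t = l.count t + (if a = t then 1 else 0) := by
      by_cases h : a = t <;> simp [h]
    rcases k with _ | k
    · rw [List.getElem_cons_zero, e1, e2]
      rcases lt_trichotomy a t with h | h | h
      · simp only [if_pos h, if_neg (by omega : ¬ a = t)]; omega
      · have := hcl0 (by omega)
        simp only [if_neg (by omega : ¬ a < t), if_pos h]; omega
      · have := hcl0 (by omega); have := hce0 h
        simp only [if_neg (by omega : ¬ a < t), if_neg (by omega : ¬ a = t)]; omega
    · have hk' : k < l.length := by simpa using hk
      obtain ⟨ihlt, iheq⟩ := ih hl k hk'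
      rw [List.getElem_cons_succ, e1, e2]
      rcases lt_trichotomy a t with h | h | h
      · simp only [if_pos h, if_neg (by omega : ¬ a = t)]; omega
      · have := hcl0 (by omega)
        simp only [if_neg (by omega : ¬ a < t), if_pos h]; omega
      · have := hcl0 (by omega); have := hce0 h
        simp only [if_neg (by omega : ¬ a < t), if_neg (by omega : ¬ a = t)]; omega
theorem pv_getD (l : List Int) (i : Int) (h0 : 0 ≤ i) (h1 : i < (l.length : Int)) :
    (PySem.List.pyGet? l i).getD 0 = l[i.toNat]'(by omega) := by
  rw [PySem.List.pyGet?_eq_some_getElem l h0 h1]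
  rfl
theorem pv_bsDown (l : List Int) (t : Int) (hs : l.Pairwise (· ≤ ·)) :
    ∀ (n : Nat) (i : Int),
      i = (l.countP (fun x => decide (x < t)) : Int) - 1 + n →
      i < (l.countP (fun x => decide (x < t)) : Int) + l.count t →
      bsDown l t i = PySem.List.pyRange i ((l.countP (fun x => decide (x < t)) : Int) - 1) (-1) := by
  intro n
  induction n with
  | zero =>
    intro i hi hlt
    have hle := pv_cnt_le l t
    rw [bsDown, dif_neg, PySem.List.pyRange_neg_one_eq_nil (by omega)]
    rintro ⟨h0, hval⟩
    have hlen : i < (l.length : Int) := by omega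
    have hkn : i.toNat < l.length := by omega
    rw [pv_getD l i h0 hlen] at hval
    have := (pv_char l t hs i.toNat hkn).2.mp hval
    omega
  | succ n ih =>
    intro i hi hlt
    have hle := pv_cnt_le l t
    have h0 : 0 ≤ i := by omega
    have hlen : i < (l.length : Int) := by omega
    have hkn : i.toNat < l.length := by omega
    have hval : (PySem.List.pyGet? l i).getD 0 = t := by
      rw [pv_getD l i h0 hlen]
      exact (pv_char l t hs i.toNat hkn).2.mpr (by omega)
    rw [bsDown, dif_pos ⟨h0, hval⟩, PySem.List.pyRange_neg_one_cons (by omega),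
      ih (i - 1) (by omega) (by omega)]
theorem pv_bsUp (l : List Int) (t : Int) (hs : l.Pairwise (· ≤ ·)) :
    ∀ (n : Nat) (i : Int),
      i = (l.countP (fun x => decide (x < t)) : Int) + l.count t - n →
      (l.countP (fun x => decide (x < t)) : Int) ≤ i →
      bsUp l t i = PySem.List.pyRange i ((l.countP (fun x => decide (x < t)) : Int) + l.count t) 1 := by
  intro n
  induction n with
  | zero =>
    intro i hi hge
    have hle := pv_cnt_le l t
    rw [bsUp, dif_neg, PySem.List.pyRange_one_eq_nil (by omega)]
    rintro ⟨hl, hval⟩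
    have hkn : i.toNat < l.length := by omega
    rw [pv_getD l i (by omega) hl] at hval
    have := (pv_char l t hs i.toNat hkn).2.mp hval
    omega
  | succ n ih =>
    intro i hi hge
    have hle := pv_cnt_le l t
    have hlen : i < (l.length : Int) := by omega
    have hkn : i.toNat < l.length := by omega
    have hval : (PySem.List.pyGet? l i).getD 0 = t := by
      rw [pv_getD l i (by omega) hlen]
      exact (pv_char l t hs i.toNat hkn).2.mpr (by omega)
    rw [bsUp, dif_pos ⟨hlen, hval⟩, PySem.List.pyRange_one_cons (by omega),
      ih (i + 1) (by omega) (by omega)]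
theorem pv_bsLoop (l : List Int) (t : Int) (hs : l.Pairwise (· ≤ ·)) :
    ∀ (n : Nat) (left right : Int),
      (right - left + 1).toNat ≤ n → 0 ≤ left → right ≤ (l.length : Int) - 1 → left ≤ right + 1 →
      (∀ k : Nat, (k : Int) < left → k < l.countP (fun x => decide (x < t))) →
      (∀ k : Nat, right < (k : Int) → k < l.length →
        l.countP (fun x => decide (x < t)) + l.count t ≤ k) →
      (bsLoop l t left right).Perm
        (PySem.List.pyRange (l.countP (fun x => decide (x < t)) : Int)
          ((l.countP (fun x => decide (x < t)) : Int) + l.count t) 1) := by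
  intro n
  induction n with
  | zero =>
    intro left right hfuel h0 hr hlr1 hlow hhigh
    have hterm : ¬ left ≤ right := by omega
    rw [bsLoop, dif_neg hterm]
    have hE : l.count t = 0 := by
      by_contra hE
      have hL : l.countP (fun x => decide (x < t)) < l.length := by
        have := pv_cnt_le l t; omega
      set L := l.countP (fun x => decide (x < t)) with hLdef
      rcases lt_or_ge (L : Int) left with h | h
      · have := hlow L (by omega)
        omega
      · have := hhigh L (by omega) (by omega)
        omega
    rw [hE]
    simp
  | succ n ih =>
    intro left right hfuel h0 hr hlr1 hlow hhigh
    by_cases hlr : left ≤ right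
    · have hmid := PySem.Int.floordiv_two_mid_bounds (lo := left) (hi := right) hlr
      set mid := PySem.Int.floordiv (left + right) 2 with hmiddef
      have hmlen : mid < (l.length : Int) := by omega
      have hm0 : 0 ≤ mid := by omega
      have hkn : mid.toNat < l.length := by omega
      have hv : (PySem.List.pyGet? l mid).getD 0 = l[mid.toNat]'hkn := pv_getD l mid hm0 hmlen
      have hchar := pv_char l t hs mid.toNat hkn
      rw [bsLoop, dif_pos hlr]
      simp only [← hmiddef, hv]
      set L := l.countP (fun x => decide (x < t)) with hLdef
      set E := l.count t with hEdef
      by_cases heq : l[mid.toNat]'hkn = t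
      · rw [if_pos heq]
        have hblock : L ≤ mid.toNat ∧ mid.toNat < L + E := hchar.2.mp heq
        rw [pv_bsDown l t hs (mid - L).toNat (mid - 1) (by omega) (by omega),
            pv_bsUp l t hs (L + E - (mid + 1)).toNat (mid + 1) (by omega) (by omega),
            PySem.List.pyRange_neg_one_eq_reverse]
        have e1 : (mid - 1 + 1) = mid := by omega
        have e2 : ((L : Int) - 1 + 1) = L := by omega
        rw [e1, e2]
        have hsplit : PySem.List.pyRange ((L:Int)) ((L:Int)+E) 1
            = PySem.List.pyRange (L:Int) mid 1 ++ mid :: PySem.List.pyRange (mid + 1) ((L:Int)+E) 1 := by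
          rw [← PySem.List.pyRange_one_cons (by omega : mid < (L:Int)+E)]
          exact PySem.List.pyRange_one_append (L:Int) mid ((L:Int)+E) (by omega) (by omega)
        rw [hsplit]
        exact (List.Perm.cons mid (List.Perm.append ((PySem.List.pyRange (L:Int) mid 1).reverse_perm) (List.Perm.refl _))).trans List.perm_middle.symm
      · rw [if_neg heq]
        by_cases hlt : l[mid.toNat]'hkn < t
        · rw [if_pos hlt]
          apply ih (mid + 1) right (by omega) (by omega) hr (by omega)
          · intro k hk
            rcases lt_or_ge (k : Int) mid with h | h
            · have hkl : k < l.length := by omega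
              have hle : l[k]'hkl ≤ l[mid.toNat]'hkn := by
                rcases eq_or_lt_of_le (by omega : k ≤ mid.toNat) with he | hlt2
                · subst he; exact le_refl _
                · exact List.pairwise_iff_getElem.mp hs k mid.toNat hkl hkn hlt2
              exact ((pv_char l t hs k hkl).1).mp (by omega)
            · have : (k : Int) = mid := by omega
              have hkk : k = mid.toNat := by omega
              subst hkk
              exact (hchar.1).mp hlt
          · exact hhigh
        · rw [if_neg hlt]
          apply ih left (mid - 1) (by omega) h0 (by omega) (by omega) hlow
          intro k hk hkl
          have hge : l[mid.toNat]'hkn ≤ l[k]'hkl := by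
            rcases eq_or_lt_of_le (by omega : mid.toNat ≤ k) with he | hlt2
            · subst he; exact le_refl _
            · exact List.pairwise_iff_getElem.mp hs mid.toNat k hkn hkl hlt2
          have h1 : ¬ (l[k]'hkl < t) := by omega
          have h2 : ¬ (l[k]'hkl = t) := by omega
          have c1 := (pv_char l t hs k hkl).1
          have c2 := (pv_char l t hs k hkl).2
          omega
    · rw [bsLoop, dif_neg hlr]
      have hE : l.count t = 0 := by
        by_contra hE
        have hL : l.countP (fun x => decide (x < t)) < l.length := by
          have := pv_cnt_le l t; omega
        set L := l.countP (fun x => decide (x < t)) with hLdef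
        rcases lt_or_ge (L : Int) left with h | h
        · have := hlow L (by omega)
          omega
        · have := hhigh L (by omega) (by omega)
          omega
      rw [hE]
      simp
-- binary_search on a sorted list returns exactly the indices of the equal block
theorem pv_bsearch (l : List Int) (t : Int) (hs : l.Pairwise (· ≤ ·)) :
    binary_search l t = PySem.List.pyRange ((l.countP (fun x => decide (x < t)) : Int))
      ((l.countP (fun x => decide (x < t)) : Int) + l.count t) 1 := by
  have hperm := pv_bsLoop l t hs l.length 0 ((l.length : Int) - 1)
    (by omega) (by omega) (by omega) (by omega)
    (fun k hk => absurd hk (by omega))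
    (fun k h1 h2 => absurd h1 (by omega))
  unfold binary_search
  exact PySem.List.sorted_eq_of_perm_of_pairwise_lt _ _ _ hperm.symm
    (PySem.List.pairwise_lt_pyRange_one _ _)
theorem pv_rowflat (row : List Int) (acc : List Int) :
    (PySem.List.pyRange 0 ((row.length : Int)) 1).foldl
      (fun a j => a ++ [PySem.List.pyGetD row j 0]) acc = acc ++ row := by
  rw [PySem.List.foldl_append_singleton_eq_map]
  congr 1
  exact PySem.List.map_pyGetD_pyRange_zero' row 0

-- dict row: inserting keys i*c0 + j for j < cN
theorem pv_rowdict (i c0 : Int) (cN : Nat) :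
    ∀ (d : PySem.Dict Int (Int × Int)) (k : Int),
      ((PySem.List.pyRange 0 (cN : Int) 1).foldl
        (fun d j => d.insert (i * c0 + j) (i, j)) d).get? k
      = if i * c0 ≤ k ∧ k < i * c0 + cN then some (i, k - i * c0) else d.get? k := by
  induction cN with
  | zero =>
    intro d k
    rw [PySem.List.pyRange_one_eq_nil (by omega)]
    simp only [List.foldl_nil]
    rw [if_neg (by omega)]
  | succ cN ih =>
    intro d k
    have hcast : ((cN + 1 : Nat) : Int) = (cN : Int) + 1 := by push_cast; ring
    rw [hcast, PySem.List.pyRange_one_succ_right (by omega), List.foldl_append]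
    simp only [List.foldl_cons, List.foldl_nil]
    by_cases hk : k = i * c0 + cN
    · subst hk
      rw [PySem.Dict.get?_insert_self, if_pos (by omega)]
      have h2 : i * c0 + (cN : Int) - i * c0 = (cN : Int) := by omega
      rw [h2]
    · rw [PySem.Dict.get?_insert_of_ne _ _ (by omega), ih d k]
      by_cases h1 : i * c0 ≤ k ∧ k < i * c0 + cN
      · rw [if_pos h1, if_pos (by omega)]
      · rw [if_neg h1, if_neg (by omega)]
theorem pv_fulldict (matrix : List (List Int)) (c0 : Int)
    (hrect : ∀ row ∈ matrix, (row.length : Int) = c0) :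
    ∀ (m : Nat), m ≤ matrix.length → ∀ k : Int,
      ((PySem.List.pyRange 0 (m : Int) 1).foldl
        (fun d i => (PySem.List.pyRange 0 (((PySem.List.pyGetD matrix i []).length : Int)) 1).foldl
          (fun d j => d.insert (i * c0 + j) (i, j)) d) (PySem.Dict.empty : PySem.Dict Int (Int × Int))).get? k
      = if 0 ≤ k ∧ k < m * c0 then some (PySem.Int.floordiv k c0, PySem.Int.mod k c0) else none := by
  intro m
  induction m with
  | zero =>
    intro hm k
    rw [PySem.List.pyRange_one_eq_nil (by omega)]
    simp only [List.foldl_nil]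
    rw [if_neg (by intro h; omega)]
    simp [PySem.Dict.get?, PySem.Dict.empty]
  | succ m ih =>
    intro hm k
    have hmlt : m < matrix.length := by omega
    have hcast : ((m + 1 : Nat) : Int) = (m : Int) + 1 := by push_cast; ring
    rw [hcast, PySem.List.pyRange_one_succ_right (by omega), List.foldl_append]
    simp only [List.foldl_cons, List.foldl_nil]
    have hrow : PySem.List.pyGetD matrix (m : Int) [] = matrix[m] := by
      rw [PySem.List.pyGetD_natCast]
      exact List.getD_eq_getElem matrix [] hmlt
    have hlen : ((matrix[m].length : Int)) = c0 := hrect _ (List.getElem_mem hmlt)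
    rw [hrow, pv_rowdict, hlen, ih (by omega) k]
    have e : ((m : Int) + 1) * c0 = (m : Int) * c0 + c0 := by ring
    set P := (m : Int) * c0 with hP
    rw [e]
    by_cases h1 : P ≤ k ∧ k < P + c0
    · have hc0 : 0 < c0 := by omega
      have hP0 : 0 ≤ P := mul_nonneg (by positivity) (le_of_lt hc0)
      rw [if_pos h1, if_pos (show 0 ≤ k ∧ k < P + c0 by omega)]
      have hdiv : PySem.Int.floordiv k c0 = (m : Int) := by
        rw [PySem.Int.floordiv_eq_iff_of_pos hc0]
        constructor
        · omega
        · omega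
      have hmod := PySem.Int.floordiv_mul_add_mod k c0
      rw [hdiv] at hmod
      rw [hdiv]
      have hm2 : PySem.Int.mod k c0 = k - P := by omega
      rw [hm2]
    · rw [if_neg h1]
      by_cases h2 : 0 ≤ k ∧ k < P
      · rw [if_pos h2, if_pos (show 0 ≤ k ∧ k < P + c0 by omega)]
      · rw [if_neg h2, if_neg (show ¬(0 ≤ k ∧ k < P + c0) by omega)]
theorem pv_flatlen : ∀ (mx : List (List Int)) (c : Int),
    (∀ row ∈ mx, (row.length : Int) = c) →
    ((mx.flatten.length : Int)) = mx.length * c := by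
  intro mx
  induction mx with
  | nil => intro c _; simp
  | cons row rest ih =>
    intro c hrect
    have hrow : ((row.length : Int)) = c := hrect row (by simp)
    have hrest := ih c (fun r hr => hrect r (by simp [hr]))
    simp only [List.flatten_cons, List.length_append, List.length_cons]
    push_cast
    push_cast at hrest
    rw [hrow] at *
    rw [hrest]
    ring
-- the inner Python loop builds flat ++ row and inserts the row's keys
theorem pv_innerpair (row : List Int) (i kc : Int) (st : List Int × PySem.Dict Int (Int × Int)) :
    (PySem.List.pyRange 0 ((row.length : Int)) 1).foldl
      (fun st j => (st.1 ++ [PySem.List.pyGetD row j 0], st.2.insert (i * kc + j) (i, j))) st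
    = (st.1 ++ row,
       (PySem.List.pyRange 0 ((row.length : Int)) 1).foldl
         (fun d j => d.insert (i * kc + j) (i, j)) st.2) := by
  obtain ⟨a, b⟩ := st
  rw [PySem.List.foldl_prod_mk (fun acc j => acc ++ [PySem.List.pyGetD row j 0])
      (fun d j => PySem.Dict.insert d (i * kc + j) (i, j))]
  rw [pv_rowflat]
-- the outer Python loop: state after the double fold is (flatten, index_map)
theorem pv_statem (matrix : List (List Int)) :
    ∀ (m : Nat), m ≤ matrix.length →
    ∀ (st : List Int × PySem.Dict Int (Int × Int)),
      (PySem.List.pyRange 0 (m : Int) 1).foldl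
        (fun st i =>
          (PySem.List.pyRange 0 ((PySem.List.pyGetD matrix i []).length : Int) 1).foldl
            (fun st j =>
              (st.1 ++ [PySem.List.pyGetD (PySem.List.pyGetD matrix i []) j 0],
               st.2.insert (i * ((PySem.List.pyGetD matrix 0 []).length : Int) + j) (i, j)))
            st)
        st
      = (st.1 ++ ((matrix.take m).flatten),
         (PySem.List.pyRange 0 (m : Int) 1).foldl
           (fun d i => (PySem.List.pyRange 0 ((PySem.List.pyGetD matrix i []).length : Int) 1).foldl
             (fun d j => d.insert (i * ((PySem.List.pyGetD matrix 0 []).length : Int) + j) (i, j)) d)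
           st.2) := by
  intro m
  induction m with
  | zero =>
    intro hm st
    rw [PySem.List.pyRange_one_eq_nil (by omega)]
    simp
  | succ m ih =>
    intro hm st
    have hmlt : m < matrix.length := by omega
    have hcast : ((m + 1 : Nat) : Int) = (m : Int) + 1 := by push_cast; ring
    rw [hcast, PySem.List.pyRange_one_succ_right (by omega), List.foldl_append,
      List.foldl_append, ih (by omega) st]
    simp only [List.foldl_cons, List.foldl_nil]
    rw [pv_innerpair]
    have htake : (matrix.take (m + 1)).flatten = (matrix.take m).flatten ++ matrix[m] := by
      rw [List.take_add_one, List.getElem?_eq_getElem hmlt]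
      simp only [Option.toList_some, List.flatten_append, List.flatten_cons, List.flatten_nil,
        List.append_nil]
    have hrow : PySem.List.pyGetD matrix (m : Int) [] = matrix[m] := by
      rw [PySem.List.pyGetD_natCast]
      exact List.getD_eq_getElem matrix [] hmlt
    rw [htake, hrow, List.append_assoc]
theorem pv_bcount_row (t : Int) (l : List Int) :
    ∀ p : Int × Int,
      l.foldl (fun p x => if x < t then (p.1 + 1, p.2)
                          else if x = t then (p.1, p.2 + 1) else p) p
      = (p.1 + (l.countP (fun x => decide (x < t)) : Int), p.2 + (l.count t : Int)) := by
  induction l with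
  | nil => intro p; simp
  | cons a l ih =>
    intro p
    have e1 : (a :: l).countP (fun x => decide (x < t))
        = l.countP (fun x => decide (x < t)) + (if a < t then 1 else 0) := by
      by_cases h : a < t <;> simp [h]
    have e2 : (a :: l).count t = l.count t + (if a = t then 1 else 0) := by
      by_cases h : a = t <;> simp [h]
    simp only [List.foldl_cons]
    rw [e1, e2]
    rcases lt_trichotomy a t with h | h | h
    · rw [if_pos h, ih, if_pos h, if_neg (by omega : ¬ a = t)]
      simp only [Prod.mk.injEq]
      constructor <;> push_cast <;> ring
    · rw [if_neg (by omega : ¬ a < t), if_pos h, ih,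
        if_neg (by omega : ¬ a < t), if_pos h]
      simp only [Prod.mk.injEq]
      constructor <;> push_cast <;> ring
    · rw [if_neg (by omega : ¬ a < t), if_neg (by omega : ¬ a = t), ih,
        if_neg (by omega : ¬ a < t), if_neg (by omega : ¬ a = t)]
      simp only [Prod.mk.injEq]
      constructor <;> push_cast <;> ring
theorem pv_bcount (t : Int) (mx : List (List Int)) :
    ∀ p : Int × Int,
      mx.foldl (fun p row =>
        row.foldl (fun p x => if x < t then (p.1 + 1, p.2)
                              else if x = t then (p.1, p.2 + 1) else p) p) p
      = (p.1 + (mx.flatten.countP (fun x => decide (x < t)) : Int),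
         p.2 + (mx.flatten.count t : Int)) := by
  induction mx with
  | nil => intro p; simp
  | cons row rest ih =>
    intro p
    simp only [List.foldl_cons]
    rw [pv_bcount_row, ih]
    simp only [List.flatten_cons, List.countP_append, List.count_append, Prod.ext_iff]
    constructor <;> push_cast <;> ring
theorem pv_main (matrix : List (List Int)) (target : Int)
    (hpre : (∀ row ∈ matrix, row.length = (matrix.headD []).length) ∨
            (∀ row ∈ matrix, target ∉ row)) :
    find_in_matrix matrix target = find_in_matrix_alt matrix target := by
  simp only [find_in_matrix, find_in_matrix_alt]
  rw [pv_statem matrix matrix.length (le_refl _) ([], PySem.Dict.empty),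
    pv_bcount target matrix (0, 0)]
  simp only [List.take_length, List.nil_append, zero_add]
  have hsp : (PySem.List.sorted matrix.flatten (fun x => x) false).Pairwise (· ≤ ·) := by
    have := PySem.List.sorted_pairwise (xs := matrix.flatten) (key := fun x => x)
    exact this
  rw [pv_bsearch _ target hsp,
    (PySem.List.sorted_perm (xs := matrix.flatten) (key := fun x => x) (rev := false)).countP_eq,
    (PySem.List.sorted_perm (xs := matrix.flatten) (key := fun x => x) (rev := false)).count_eq]
  set L := matrix.flatten.countP (fun x => decide (x < target)) with hL
  set E := matrix.flatten.count target with hE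
  rcases Nat.eq_zero_or_pos E with hE0 | hEpos
  · rw [if_pos (by exact_mod_cast hE0), hE0]
    rw [show ((L : Int) + (0 : Nat)) = (L : Int) by push_cast; ring,
      PySem.List.pyRange_one_eq_nil (le_refl _)]
    simp
  · have hmem : target ∈ matrix.flatten := by
      rw [← List.count_pos_iff]
      omega
    have hrect0 : ∀ row ∈ matrix, row.length = (matrix.headD []).length := by
      rcases hpre with h | h
      · exact h
      · exfalso
        obtain ⟨row, hrow, hin⟩ := List.mem_flatten.mp hmem
        exact h row hrow hin
    obtain ⟨row0, hrow0, hin0⟩ := List.mem_flatten.mp hmem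
    have hmx : matrix ≠ [] := by
      intro h; subst h; simp at hrow0
    have hhead : PySem.List.pyGetD matrix 0 [] = matrix.headD [] := by
      cases matrix with
      | nil => simp at hmx
      | cons h t => simp [PySem.List.pyGetD, PySem.List.pyGet?, PySem.List.pyIdx?]
    set c0 : Int := ((PySem.List.pyGetD matrix 0 []).length : Int) with hc0
    have hrect : ∀ row ∈ matrix, (row.length : Int) = c0 := by
      intro row hr
      rw [hc0, hhead, hrect0 row hr]
    have hc0pos : 0 < c0 := by
      have h1 := hrect row0 hrow0
      have h2 : row0.length ≠ 0 := by
        intro h; rw [List.length_eq_zero_iff] at h; subst h; simp at hin0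
      omega
    have hflen : ((matrix.flatten.length : Int)) = matrix.length * c0 :=
      pv_flatlen matrix c0 hrect
    have hcnt := pv_cnt_le matrix.flatten target
    rw [if_neg (by omega)]
    apply List.map_congr_left
    intro p hp
    rw [PySem.List.mem_pyRange_one] at hp
    rw [pv_fulldict matrix c0 hrect matrix.length (le_refl _) p]
    rw [if_pos (by constructor <;> [omega; (rw [← hflen]; push_cast; omega)])]
    rfl

-- ===== VERDICT (by name: the statement is the Claim_ definition above) =====
theorem find_in_matrix_spec : Claim_equal_find_in_matrix := by
  intro matrix target _ hpre
  exact pv_main matrix target hpre
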